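/-
  THE SEGMENTS OF `GifAddExtensionBlock` (gifalloc.c:229-265; 107B40H … 107C6AH, 88 instructions; NO protected frame), as DGifSlurp
  calls it (on the PENDING list of gif): the assertions at its three cut points, the segment claims, and the COMPOSITION
  (segments ⇒ `GifAddExtensionBlock.spec`), proved here.

  THE CODE:
      107B40H  six pushes (r15 r14 r13 r12 rbp rbx), `sub rsp, 8`                       rsp = RA − 56
      107B4EH  `rbp = &count`, `rbx = &blocks`, `r14d = Function`, `r12d = Len`, `r13 = ExtData`
      107B5DH  `r15 = *blocks` (checked); NULL → 107C24H: `malloc(24)`, the checked store `*blocks = r15` → 107BA6H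
      107B71H  `reallocarray(r15, *count + 1, 24)`; NULL → 107C41H: `eax = 0` → 107C4DH; else the checked store `*blocks = r15`
      107BA6H  CUT 1  `rbx = *blocks` (checked); NULL → 107C48H: `eax = 0` → 107C4DH
      107BBAH  `eax = *count`, `*count = eax + 1`, `rbx = ep = blocks + 24 · eax`, the checked stores `ep->Function`, `ep->ByteCount`,
               `malloc(Len)` → `rbp`, the checked store `ep->Bytes = rbp`
      107C05H  CUT 2  `rbp == NULL` → 107C5CH: `eax = 0` → 107C4DH; `ExtData != NULL`: `memcpy(rbp, r13, r12d)`, `eax = 1`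
      107C4DH  CUT 3  `add rsp, 8`, six pops, `ret`

  SEGMENTS:
      GifAddExtensionBlock.1   107B40H … 107BA6H, 107C24H … 107C48H   40 instructions   openbsd_reallocarray | malloc   → `AfterArray` | `Done`
      GifAddExtensionBlock.2   107BA6H … 107C05H, 107C48H              26 instructions   malloc                          → `AfterBytes` | `Done`
      GifAddExtensionBlock.3   107C05H … 107C24H, 107C5CH … 107C6AH   14 instructions   memcpy                          → `Done`
      GifAddExtensionBlock.E   107C4DH … ret                            8 instructions   —                               → `Returned`

  WHY THESE CUTS. The state invariant `GifOK` holds at ALL THREE: at CUT 1 the array has room for one more block and the count is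
  the old one (the forest: the old blocks in the new array, `cap = length + 1`; or the empty array of one slot; or no list at
  all after a failed first `malloc`); at CUT 2 the new block is counted AND its `Bytes` field is stored (NULL after a failed
  `malloc`: the forest's `Blk.bytes = 0`, design F-2). The window in which the new block is COUNTED while its `Bytes` field
  holds garbage (107BC8H … 107C01H, across `malloc(Len)`) lies INSIDE segment 2: no assertion is stated there. The worker of
  segment 2 carries `Shape Fc R` of the ENTRY memory of the segment and the footprint since (`*count`, the three fields of the
  new slot — windows inside the capacity of the pending array, behind its counted part —, `malloc`'s windows: all loose or
  `Shape.set_pend`'s), and applies `Shape.set_pend` ONCE, at 107C05H, with `ExtsAt.snoc` (or `ExtsAt.first`): `GifOK.pend_snoc`.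

  THE KEY IDEA FOR THE CALLS OF THE HEAP (Gif/Spec/AllocCarry.lean; farm.gif/hints/heap_client.md; the worked units
  farm.gif/worked/GifAddExtensionBlock.1 … .E). Neither `malloc` nor `reallocarray` writes a byte that `Shape F R` reads: their static
  footprints are LOOSE for the OLD heap and forest (the stack, the control cell, the region at or above `next − 32`, a header's
  state word, the shadow: `Loose.alloc`, `Loose.realloc`). So at the callee's return `Shape F R w.mem` STILL holds, in every
  outcome — after a moving `realloc` the field `*blocks` dangles, which `Shape` does not mind, and the freed array's bytes are
  intact. Only the heap `Hn` and what it owns change. A worker's assertion at the callee's return carries `Shape F R w.mem`,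
  `Placed Hn F.owned` (`(h.owns.placed hok).push … / .release … / .resize …`), `HeapInv Hn …` and `Owns Hn <the new list>`; the
  store of `*blocks` is then ONE `Shape.set_pend` over the NEW heap `Hn` (with `Placed`, not `Owns`, of the OLD forest) and the
  returned memory: `GifOK.pend_first` (the first array), `GifOK.pend_grown` (in place and moved alike: `ExtsAt.moved`, whose copy
  hypothesis is stated in the SAME memory: trivial in place, `copy_moved` after a move).
-/
import Gif.Spec.Alloc
import Gif.LabelsAt
namespace Gif.Spec
open X86 X86.User Asan ProgX.Base ProgX.Base.Spec

namespace GifAddExtensionBlock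

/-- **AFTER THE ARRAY HAS ROOM** (at 107BA6H, l.247), inside the call entered at `e` (return address `ret`) with the function's
precondition. The present heap is `Hc`, the present forest `Fc`: `F` but for `pend`, which is the OLD blocks in an array with room
for one more (`reallocarray` in place or moved; `malloc(24)` for the first block: no block, one slot), or still `none` (the first
`malloc` failed: the next test returns GIF_ERROR). `*count` is still the old count. Registers: `rbp = &count`, `rbx = &blocks`,
`r12d = Len`, `r13 = ExtData`, `r14d = Function`; `r15` is dead (the array pointer is re-loaded from `*blocks`). -/
structure AfterArray (H : Heap) (rest : List Obj) (frames : List (Nat × FrameLayout)) (F : Forest) (R : Rd) (len : Nat)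
    (Hc : Heap) (Fc : Forest) (u₀ e : State) (ret : Word) (v : State) : Prop where
  /-- the function was entered at `e` … -/
  entry : AtEntry (conv u₀) Gif.L.GifAddExtensionBlock.entry (GifAddExtensionBlock.spec H rest frames F R len).frame ret e
  /-- … with its precondition -/
  pre : (GifAddExtensionBlock.spec H rest frames F R len).pre e
  rip : v.rip = Gif.L.GifAddExtensionBlock.at_107ba6
  /-- six pushes and `sub rsp, 8` -/
  rsp : v.reg .rsp = e.reg .rsp - 56
  /-- `mov rbx, rsi`: `&gif.ExtensionBlocks` -/
  rbx : v.reg .rbx = e.reg .rsi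
  /-- `mov rbp, rdi`: `&gif.ExtensionBlockCount` -/
  rbp : v.reg .rbp = e.reg .rdi
  /-- `mov r12d, ecx`: `Len`, zero-extended -/
  r12 : (v.reg .r12).toNat = len
  /-- `mov r13, r8`: `ExtData` -/
  r13 : v.reg .r13 = e.reg .r8
  /-- `mov r14d, edx`: `Function`, zero-extended (stored to `ep->Function`: no clause needs its value) -/
  r14 : (v.reg .r14).toNat = (e.reg .rdx).toNat % 2 ^ 32
  /-- the saved registers, in push order -/
  slot_r15 : v.mem.readLE (e.reg .rsp - 8) 8 = (e.reg .r15).toNat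
  slot_r14 : v.mem.readLE (e.reg .rsp - 16) 8 = (e.reg .r14).toNat
  slot_r13 : v.mem.readLE (e.reg .rsp - 24) 8 = (e.reg .r13).toNat
  slot_r12 : v.mem.readLE (e.reg .rsp - 32) 8 = (e.reg .r12).toNat
  slot_rbp : v.mem.readLE (e.reg .rsp - 40) 8 = (e.reg .rbp).toNat
  slot_rbx : v.mem.readLE (e.reg .rsp - 48) 8 = (e.reg .rbx).toNat
  /-- the return address is still in its slot: handed on, cut by cut, to `Done` (the `ret` at 107C5BH reads it) -/
  slot_ra : UInt64.ofNat (v.mem.readLE (e.reg .rsp) 8) = ret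
  /-- the present heap is at the place of the entry's -/
  region : SameRegion H Hc
  /-- the present forest differs from the entry's in `pend` only -/
  sameBut : F.SameButPend Fc
  /-- the pending array has a slot behind its counted blocks -/
  room : ∀ x, Fc.pend = some x → x.blocks.length + 1 ≤ x.cap
  /-- the heap's invariant, the clean stack ending at the present stack pointer -/
  inv : HeapInv Hc rest frames ((e.reg .rsp).toNat - 56) v.mem
  /-- the state invariant -/
  ok : GifOK Hc Fc R v.mem
  /-- no input was read -/
  rem : rem R v.mem = rem R e.mem
  /-- nothing was written but the function's stack and the contract's window (the heap's region and the shadow: ONE coarse window) -/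
  same : Mem.SameExcept
    [⟨(e.reg .rsp).toNat - 208, (e.reg .rsp).toNat⟩,
     ⟨0x800000, 0x1000020⟩] e.mem v.mem
  code : (conv u₀).code.In v.mem
  abi : (conv u₀).inv v

/-- **AFTER THE NEW BLOCK IS COMPLETE** (at 107C05H, l.256): the block is counted, its three fields are stored. `rbp = ep->Bytes`,
the result of `malloc(Len)`: NULL — then the forest's last block has `bytes = 0`, and the next test returns GIF_ERROR —, or a
data object `(rbp, len)` of the present forest (live by `ok.owns`, loose by `Loose.data`: the destination of the `memcpy`).
`r12d = Len`, `r13 = ExtData`; `rbx`, `r14`, `r15` are dead. -/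
structure AfterBytes (H : Heap) (rest : List Obj) (frames : List (Nat × FrameLayout)) (F : Forest) (R : Rd) (len : Nat)
    (Hc : Heap) (Fc : Forest) (u₀ e : State) (ret : Word) (v : State) : Prop where
  entry : AtEntry (conv u₀) Gif.L.GifAddExtensionBlock.entry (GifAddExtensionBlock.spec H rest frames F R len).frame ret e
  pre : (GifAddExtensionBlock.spec H rest frames F R len).pre e
  rip : v.rip = Gif.L.GifAddExtensionBlock.at_107c05
  rsp : v.reg .rsp = e.reg .rsp - 56
  /-- `rbp = ep->Bytes`: NULL, or the new data object of the forest -/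
  rbp : (v.reg .rbp).toNat = 0 ∨ ((v.reg .rbp).toNat, len) ∈ Fc.datas
  /-- `r12d = Len`, zero-extended -/
  r12 : (v.reg .r12).toNat = len
  /-- `r13 = ExtData` -/
  r13 : v.reg .r13 = e.reg .r8
  /-- the saved registers, in push order -/
  slot_r15 : v.mem.readLE (e.reg .rsp - 8) 8 = (e.reg .r15).toNat
  slot_r14 : v.mem.readLE (e.reg .rsp - 16) 8 = (e.reg .r14).toNat
  slot_r13 : v.mem.readLE (e.reg .rsp - 24) 8 = (e.reg .r13).toNat
  slot_r12 : v.mem.readLE (e.reg .rsp - 32) 8 = (e.reg .r12).toNat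
  slot_rbp : v.mem.readLE (e.reg .rsp - 40) 8 = (e.reg .rbp).toNat
  slot_rbx : v.mem.readLE (e.reg .rsp - 48) 8 = (e.reg .rbx).toNat
  /-- the return address is still in its slot: segment 3 hands it on to `Done` (the `ret` at 107C5BH reads it) -/
  slot_ra : UInt64.ofNat (v.mem.readLE (e.reg .rsp) 8) = ret
  region : SameRegion H Hc
  sameBut : F.SameButPend Fc
  inv : HeapInv Hc rest frames ((e.reg .rsp).toNat - 56) v.mem
  ok : GifOK Hc Fc R v.mem
  rem : rem R v.mem = rem R e.mem
  same : Mem.SameExcept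
    [⟨(e.reg .rsp).toNat - 208, (e.reg .rsp).toNat⟩,
     ⟨0x800000, 0x1000020⟩] e.mem v.mem
  code : (conv u₀).code.In v.mem
  abi : (conv u₀).inv v

/-- **BEFORE THE EPILOGUE** (at 107C4DH, l.265: the five returns join here): `eax` is GIF_OK (1) or GIF_ERROR (0), zero-extended
(`mov eax, imm32`); the contract's postcondition holds of the present memory, heap and forest with the present stack pointer for
the caller's. -/
structure Done (H : Heap) (rest : List Obj) (frames : List (Nat × FrameLayout)) (F : Forest) (R : Rd) (len : Nat)
    (Hc : Heap) (Fc : Forest) (u₀ e : State) (ret : Word) (v : State) : Prop where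
  entry : AtEntry (conv u₀) Gif.L.GifAddExtensionBlock.entry (GifAddExtensionBlock.spec H rest frames F R len).frame ret e
  pre : (GifAddExtensionBlock.spec H rest frames F R len).pre e
  rip : v.rip = Gif.L.GifAddExtensionBlock.at_107c4d
  rsp : v.reg .rsp = e.reg .rsp - 56
  /-- the result -/
  res : IsBool v
  /-- the saved registers, in push order: the six pops at 107C51H … 107C59H read them -/
  slot_r15 : v.mem.readLE (e.reg .rsp - 8) 8 = (e.reg .r15).toNat
  slot_r14 : v.mem.readLE (e.reg .rsp - 16) 8 = (e.reg .r14).toNat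
  slot_r13 : v.mem.readLE (e.reg .rsp - 24) 8 = (e.reg .r13).toNat
  slot_r12 : v.mem.readLE (e.reg .rsp - 32) 8 = (e.reg .r12).toNat
  slot_rbp : v.mem.readLE (e.reg .rsp - 40) 8 = (e.reg .rbp).toNat
  slot_rbx : v.mem.readLE (e.reg .rsp - 48) 8 = (e.reg .rbx).toNat
  /-- the return address is still in its slot: the `ret` at 107C5BH reads it -/
  slot_ra : UInt64.ofNat (v.mem.readLE (e.reg .rsp) 8) = ret
  region : SameRegion H Hc
  sameBut : F.SameButPend Fc
  inv : HeapInv Hc rest frames ((e.reg .rsp).toNat - 56) v.mem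
  ok : GifOK Hc Fc R v.mem
  rem : rem R v.mem = rem R e.mem
  same : Mem.SameExcept
    [⟨(e.reg .rsp).toNat - 208, (e.reg .rsp).toNat⟩,
     ⟨0x800000, 0x1000020⟩] e.mem v.mem
  code : (conv u₀).code.In v.mem
  abi : (conv u₀).inv v

/-- **Segment 1** (107B40H … 107BA6H, 107C24H … 107C48H; 40 instructions; l.231-245): the prologue, the checked load of
`*blocks`. The first block (`F.pend = none`): `malloc(24)`, the checked store of the result (NULL or the new array of one slot).
Otherwise `reallocarray(*blocks, *count + 1, 24)` (`openbsd_reallocarray.spec` with `n = 24 · cap`, `c` from `Hc.Live`; the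
factors are `length + 1 ≤ cap + 1 < 2^31` and 24): NULL: GIF_ERROR with NOTHING changed (`Done` for `H`, `F`); in place
(`Owns.resize_head`) or moved (`ExtsAt.moved`, `Owns.push_cons`, `Owns.release`): the checked store of `*blocks`.
HOW: split on the GHOST `F.pend` before the walk; at the callee's return the shape of the ENTRY still holds (`Shape.sameExcept`
with `Loose.alloc` / `Loose.realloc`: the header's KEY IDEA), the heap is `Hn`; the store of `*blocks` is `GifOK.pend_first` /
`GifOK.pend_grown`: `Shape.set_pend` over the NEW heap `Hn`, with `Placed Hn F.owned` of the OLD forest and `Owns Hn` of the new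
list (Gif/Spec/AllocCarry.lean). The three heaps of `realloc` all fit `∃ Hc Fc, AfterArray …`: `H.resize x.arr m`,
`(H.push m (H.moveCap m)).release x.arr`, and — failed — `Done … H F`. -/
def Seg1 (Lay : Layout) (μ : Microarch) (u₀ : State) : Prop :=
  ∀ (H : Heap) (rest : List Obj) (frames : List (Nat × FrameLayout)) (F : Forest) (R : Rd) (len : Nat) (e : State) (ret : Word),
    AtEntry (conv u₀) Gif.L.GifAddExtensionBlock.entry (GifAddExtensionBlock.spec H rest frames F R len).frame ret e →
    (GifAddExtensionBlock.spec H rest frames F R len).pre e →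
    ReachVia Lay μ WayInv e (fun w =>
      (∃ Hc Fc, AfterArray H rest frames F R len Hc Fc u₀ e ret w) ∨
      Done H rest frames F R len H F u₀ e ret w)

/-- **Segment 2** (107BA6H … 107C05H, 107C48H; 26 instructions; l.247-255): the checked re-load of `*blocks`: NULL (the first
`malloc` failed): GIF_ERROR, nothing changed. Otherwise `(*count)++`, `ep = &blocks[old count]` (inside the array: `room`), the
checked stores of `ep->Function`, `ep->ByteCount`, `malloc(Len)`, the checked store of `ep->Bytes`: the new block
`⟨rbp, len⟩` is counted (`ExtsAt.snoc`; `Exts.objs_snoc`, `Owns.push_cons` for its object): `GifOK.pend_snoc`, applied ONCE at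
the exit to the `GifOK` of the cut and the footprint since (both outcomes of `malloc` in ONE clause: `Owns Hm (Blk.objs ⟨rax, len⟩
++ Fc.owned)`; a failed `malloc(Len)` counts the block `⟨0, len⟩`, whose `Blk.objs` is empty: nothing is leaked or lost). -/
def Seg2 (Lay : Layout) (μ : Microarch) (u₀ : State) : Prop :=
  ∀ (H : Heap) (rest : List Obj) (frames : List (Nat × FrameLayout)) (F : Forest) (R : Rd) (len : Nat) (Hc : Heap) (Fc : Forest)
    (e : State) (ret : Word) (v : State),
    AfterArray H rest frames F R len Hc Fc u₀ e ret v →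
    ReachVia Lay μ WayInv v (fun w =>
      (∃ Hc' Fc', AfterBytes H rest frames F R len Hc' Fc' u₀ e ret w) ∨
      Done H rest frames F R len Hc Fc u₀ e ret w)

/-- **Segment 3** (107C05H … 107C24H, 107C5CH … 107C6AH; 14 instructions; l.256-264): `Bytes == NULL`: GIF_ERROR (the counted
block has `bytes = 0`: the state invariant holds). `ExtData != NULL` (always: it points into `pv.Buf`): `memcpy(Bytes, ExtData,
Len)`: the source lies in pv, the destination is another owned object (`Owns.far`: no overlap; `GifOK.data_far_pv`), a data object
of the forest (`GifOK.sameExcept` with `Loose.data`); GIF_OK. The heap and the forest do not change. -/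
def Seg3 (Lay : Layout) (μ : Microarch) (u₀ : State) : Prop :=
  ∀ (H : Heap) (rest : List Obj) (frames : List (Nat × FrameLayout)) (F : Forest) (R : Rd) (len : Nat) (Hc : Heap) (Fc : Forest)
    (e : State) (ret : Word) (v : State),
    AfterBytes H rest frames F R len Hc Fc u₀ e ret v →
    ReachVia Lay μ WayInv v (Done H rest frames F R len Hc Fc u₀ e ret)

/-- **Segment E** (107C4DH … ret; 8 instructions; l.265): `add rsp, 8`, six pops, `ret`: the contract's `Returned` (`Back2` for
`Hc`, `Fc`; `HeapPre.raise_back` lifts the heap's invariant to the caller's stack pointer). -/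
def SegE (Lay : Layout) (μ : Microarch) (u₀ : State) : Prop :=
  ∀ (H : Heap) (rest : List Obj) (frames : List (Nat × FrameLayout)) (F : Forest) (R : Rd) (len : Nat) (Hc : Heap) (Fc : Forest)
    (e : State) (ret : Word) (v : State),
    Done H rest frames F R len Hc Fc u₀ e ret v →
    ReachVia Lay μ WayInv v (Returned (conv u₀) (GifAddExtensionBlock.spec H rest frames F R len) e ret)

/-- **The composition of `GifAddExtensionBlock`**: the four segments chain into the function's contract. -/
theorem compose {Lay : Layout} {μ : Microarch} {u₀ : State} (h1 : Seg1 Lay μ u₀) (h2 : Seg2 Lay μ u₀) (h3 : Seg3 Lay μ u₀)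
    (hE : SegE Lay μ u₀) :
    ∀ (H : Heap) (rest : List Obj) (frames : List (Nat × FrameLayout)) (F : Forest) (R : Rd) (len : Nat),
      Calls Lay μ WayInv (conv u₀) Gif.L.GifAddExtensionBlock.entry (GifAddExtensionBlock.spec H rest frames F R len) := by
  intro H rest frames F R len e ret he hp
  refine (h1 H rest frames F R len e ret he hp).trans ?_
  intro v hv
  rcases hv with hv | hv
  · obtain ⟨Hc, Fc, hv⟩ := hv
    refine (h2 H rest frames F R len Hc Fc e ret v hv).trans ?_
    intro w hw
    rcases hw with hw | hw
    · obtain ⟨Hc', Fc', hw⟩ := hw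
      refine (h3 H rest frames F R len Hc' Fc' e ret w hw).trans ?_
      intro x hx
      exact hE H rest frames F R len Hc' Fc' e ret x hx
    · exact hE H rest frames F R len Hc Fc e ret w hw
  · exact hE H rest frames F R len H F e ret v hv

end GifAddExtensionBlock

end Gif.Spec
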